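-- pv_equiv track=rewrite | github.com/leiloong/eea-eval | code/data_handler/generator_entities.py | remove_by_min_degree_sorted
-- ===== SOURCE A (Python) =====
-- def remove_by_min_degree_sorted(entities, degrees, min_degree, max_degree, remove_num):
--     entities_new = dict()
--     remove_cnt = 0
--     for i_min_degree in range(0, min_degree+1):
--         if remove_cnt >= remove_num:
--             break
--         for entity, degree in degrees.items():
--             if remove_cnt >= remove_num:
--                 break
--             if entity not in entities:
--                 continue
--             if degree > max_degree:
--                 entities.pop(entity)
--                 remove_cnt += 1
--             elif degree <= i_min_degree:
--                 entities.pop(entity)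
--                 remove_cnt += 1
--
--     for head, prop_tails in entities.items():
--         prop_tails_new = dict()
--         for prop, tails in prop_tails.items():
--             tails_new = set()
--             for tail in tails:
--                 if tail in entities:
--                     tails_new.add(tail)
--             if len(tails_new) != 0:
--                 prop_tails_new[prop] = tails_new
--         if len(prop_tails_new) != 0:
--             entities_new[head] = prop_tails_new
--     return entities_new
-- ===== SOURCE B (Python) =====
-- def remove_by_min_degree_sorted(entities, degrees, min_degree, max_degree, remove_num):
--     # Return-value equivalent to A; unlike A, does NOT mutate `entities`.
--     removed = []
--     if min_degree >= 0 and remove_num > 0: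
--         # each candidate entity is removed at a single "level": 0 if its degree is
--         # > max_degree or <= 0, else its degree (only levels <= min_degree qualify)
--         buckets = {}
--         for e, d in degrees.items():
--             if e in entities:
--                 lvl = 0 if (d > max_degree or d <= 0) else d
--                 if lvl <= min_degree:
--                     buckets.setdefault(lvl, []).append(e)
--         order = []
--         for lvl in sorted(buckets):
--             order.extend(buckets[lvl])
--         removed = order[:remove_num]
--     removed = set(removed)
--     result = {}
--     for head, prop_tails in entities.items():
--         if head in removed:
--             continue
--         pt_new = {}
--         for prop, tails in prop_tails.items():
--             ts = {t for t in tails if t in entities and t not in removed}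
--             if ts:
--                 pt_new[prop] = ts
--         if pt_new:
--             result[head] = pt_new
--     return result
-- ===== Notes on version B (the rewrite author's own statement) =====
-- stated objective: alternative
-- what changed: A rescans the whole degree dict once per level 0..min_degree, popping entities until the budget is hit; B computes each candidate's removal level in a single pass over degrees, buckets candidates by level, concatenates the buckets in increasing level order, caps at remove_num, and prunes against that removed set (B also does not mutate the caller's entities dict; the equivalence is about the return value).
import Mathlib
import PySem

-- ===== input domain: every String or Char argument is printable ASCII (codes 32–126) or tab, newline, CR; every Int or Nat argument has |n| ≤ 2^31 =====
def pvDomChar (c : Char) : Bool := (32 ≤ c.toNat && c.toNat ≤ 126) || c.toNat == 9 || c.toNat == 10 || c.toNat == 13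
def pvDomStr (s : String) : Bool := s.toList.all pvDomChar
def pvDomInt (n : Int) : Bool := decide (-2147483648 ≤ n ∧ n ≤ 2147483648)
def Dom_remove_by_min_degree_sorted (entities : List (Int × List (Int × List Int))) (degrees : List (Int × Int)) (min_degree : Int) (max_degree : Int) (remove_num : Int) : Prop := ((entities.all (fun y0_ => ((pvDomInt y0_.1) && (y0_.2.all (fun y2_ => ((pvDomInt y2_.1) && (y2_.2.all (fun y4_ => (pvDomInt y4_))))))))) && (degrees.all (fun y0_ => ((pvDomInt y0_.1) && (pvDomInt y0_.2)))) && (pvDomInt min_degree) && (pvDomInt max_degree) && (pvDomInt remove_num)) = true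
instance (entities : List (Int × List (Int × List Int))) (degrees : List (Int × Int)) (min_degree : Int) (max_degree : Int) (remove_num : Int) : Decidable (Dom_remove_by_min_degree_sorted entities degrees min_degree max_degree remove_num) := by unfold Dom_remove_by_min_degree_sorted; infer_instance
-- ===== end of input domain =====

-- B replaces A's per-level rescans of the degree dict by one bucket-by-level pass over it (objective: alternative);
-- equivalence is about the RETURN value only: the Python A pops keys out of the caller's `entities` dict, B does not mutate it.

-- ===== PORT A =====
-- `k in d` on a dict = key membership
def pvHasKey {α : Type} (es : List (Int × α)) (k : Int) : Bool := es.any (fun p => p.1 == k)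
-- d[k] = v on a dict: overwrite in place, new keys append
def pvDictInsert {α : Type} (d : List (Int × α)) (k : Int) (v : α) : List (Int × α) :=
  if pvHasKey d k then d.map (fun p => if p.1 == k then (k, v) else p) else d ++ [(k, v)]
-- entities.pop(entity): drop the binding of that key (a dict binds a key once)
def pvPop (es : List (Int × List (Int × List Int))) (k : Int) : List (Int × List (Int × List Int)) :=
  es.filter (fun p => !(p.1 == k))

-- inner `for entity, degree in degrees.items()` loop of A (with its break/continue)
def pvAinner (max_degree remove_num i : Int) : List (Int × Int) → List (Int × List (Int × List Int)) → Int → List (Int × List (Int × List Int)) × Int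
  | [], es, cnt => (es, cnt)
  | (entity, degree) :: rest, es, cnt =>
    if remove_num ≤ cnt then (es, cnt)
    else if !(pvHasKey es entity) then pvAinner max_degree remove_num i rest es cnt
    else if max_degree < degree then pvAinner max_degree remove_num i rest (pvPop es entity) (cnt + 1)
    else if degree ≤ i then pvAinner max_degree remove_num i rest (pvPop es entity) (cnt + 1)
    else pvAinner max_degree remove_num i rest es cnt

-- outer `for i_min_degree in range(0, min_degree+1)` loop of A (range is lazy: counter recursion,
-- so the break on remove_cnt >= remove_num stops the loop exactly as in Python)
def pvAouter (degrees : List (Int × Int)) (max_degree remove_num stop : Int) (i : Int) (es : List (Int × List (Int × List Int))) (cnt : Int) : List (Int × List (Int × List Int)) :=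
  if h : i < stop then
    if remove_num ≤ cnt then es
    else
      pvAouter degrees max_degree remove_num stop (i + 1)
        (pvAinner max_degree remove_num i degrees es cnt).1
        (pvAinner max_degree remove_num i degrees es cnt).2
  else es
termination_by (stop - i).toNat
decreasing_by omega

def remove_by_min_degree_sorted (entities : List (Int × List (Int × List Int))) (degrees : List (Int × Int)) (min_degree : Int) (max_degree : Int) (remove_num : Int) : List (Int × List (Int × List Int)) :=
  let es := pvAouter degrees max_degree remove_num (min_degree + 1) 0 entities 0
  es.foldl (fun (acc : List (Int × List (Int × List Int))) (hp : Int × List (Int × List Int)) =>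
    let ptNew := hp.2.foldl (fun (pacc : List (Int × PySem.Set Int)) pt =>
      let tailsNew : PySem.Set Int :=
        pt.2.foldl (fun s t => if pvHasKey es t then PySem.Set.add s t else s) PySem.Set.empty
      if tailsNew.length ≠ 0 then pvDictInsert pacc pt.1 tailsNew else pacc) ([] : List (Int × PySem.Set Int))
    if ptNew.length ≠ 0 then pvDictInsert acc hp.1 ptNew else acc) ([] : List (Int × List (Int × List Int)))

-- ===== PORT B =====
-- removal level of a candidate entity of degree d (Source B: 0 if d > max_degree or d <= 0 else d)
def pvLvl (max_degree d : Int) : Int := if max_degree < d ∨ d ≤ 0 then 0 else d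

def pvBuckets (entities : List (Int × List (Int × List Int))) (degrees : List (Int × Int)) (max_degree min_degree : Int) : PySem.Dict Int (List Int) :=
  degrees.foldl (fun b p =>
    if pvHasKey entities p.1 then
      if pvLvl max_degree p.2 ≤ min_degree then b.modify (pvLvl max_degree p.2) [] (· ++ [p.1]) else b
    else b) PySem.Dict.empty

-- the `removed` list of Source B: bucket the candidates by level, flatten in level order, cap at remove_num
def pvRemoved (entities : List (Int × List (Int × List Int))) (degrees : List (Int × Int)) (min_degree max_degree remove_num : Int) : List Int :=
  if 0 ≤ min_degree ∧ 0 < remove_num then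
    let buckets := pvBuckets entities degrees max_degree min_degree
    PySem.List.slice
      ((PySem.List.sorted buckets.keys (fun x => x) false).foldl (fun acc lvl => acc ++ buckets.getD lvl []) [])
      none (some remove_num)
  else []

def remove_by_min_degree_sorted_alt (entities : List (Int × List (Int × List Int))) (degrees : List (Int × Int)) (min_degree : Int) (max_degree : Int) (remove_num : Int) : List (Int × List (Int × List Int)) :=
  let removedS : PySem.Set Int := PySem.Set.ofList (pvRemoved entities degrees min_degree max_degree remove_num)
  entities.foldl (fun (acc : List (Int × List (Int × List Int))) (hp : Int × List (Int × List Int)) =>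
    if removedS.contains hp.1 then acc
    else
      let ptNew := hp.2.foldl (fun (pacc : List (Int × PySem.Set Int)) pt =>
        let ts : PySem.Set Int :=
          PySem.Set.ofList (pt.2.filter (fun t => pvHasKey entities t && !(removedS.contains t)))
        if ts.length ≠ 0 then pvDictInsert pacc pt.1 ts else pacc) ([] : List (Int × PySem.Set Int))
      if ptNew.length ≠ 0 then pvDictInsert acc hp.1 ptNew else acc) ([] : List (Int × List (Int × List Int)))

-- ===== PRECONDITION & SPEC =====
-- Pre_ only requires the `degrees` association list to have distinct keys: `degrees` is a Python dict,
-- which cannot hold a key twice, so no input the Python A accepts is excluded.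
def Pre_remove_by_min_degree_sorted (entities : List (Int × List (Int × List Int))) (degrees : List (Int × Int)) (min_degree : Int) (max_degree : Int) (remove_num : Int) : Prop :=
  (degrees.map Prod.fst).Nodup
instance (entities : List (Int × List (Int × List Int))) (degrees : List (Int × Int)) (min_degree : Int) (max_degree : Int) (remove_num : Int) : Decidable (Pre_remove_by_min_degree_sorted entities degrees min_degree max_degree remove_num) := by unfold Pre_remove_by_min_degree_sorted; infer_instance

def pvWitness_remove_by_min_degree_sorted : (List (Int × List (Int × List Int))) × (List (Int × Int)) × Int × Int × Int :=
  ([(1, [(0, [2])]), (2, [(0, [1])])], [(1, 1), (2, 5)], 1, 3, 1)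

def Spec_remove_by_min_degree_sorted (entities : List (Int × List (Int × List Int))) (degrees : List (Int × Int)) (min_degree : Int) (max_degree : Int) (remove_num : Int) (out : List (Int × List (Int × List Int))) : Prop := out = remove_by_min_degree_sorted_alt entities degrees min_degree max_degree remove_num
instance (entities : List (Int × List (Int × List Int))) (degrees : List (Int × Int)) (min_degree : Int) (max_degree : Int) (remove_num : Int) (out : List (Int × List (Int × List Int))) : Decidable (Spec_remove_by_min_degree_sorted entities degrees min_degree max_degree remove_num out) := by unfold Spec_remove_by_min_degree_sorted; infer_instance

-- ===== CLAIM (what is proved, stated in full; the proofs are below) =====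
def Claim_equal_remove_by_min_degree_sorted : Prop := ∀ (entities : List (Int × List (Int × List Int))) (degrees : List (Int × Int)) (min_degree : Int) (max_degree : Int) (remove_num : Int), Dom_remove_by_min_degree_sorted entities degrees min_degree max_degree remove_num → Pre_remove_by_min_degree_sorted entities degrees min_degree max_degree remove_num → Spec_remove_by_min_degree_sorted entities degrees min_degree max_degree remove_num (remove_by_min_degree_sorted entities degrees min_degree max_degree remove_num)

-- ===== LEMMAS AND PROOFS =====

-- the entities removed at level k, in `degrees` order
def pvG (entities : List (Int × List (Int × List Int))) (degrees : List (Int × Int)) (max_degree k : Int) : List Int :=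
  (degrees.filter (fun p => pvHasKey entities p.1 && (pvLvl max_degree p.2 == k))).map Prod.fst

-- concatenation of the level groups 0, 1, …, i-1
def pvF (entities : List (Int × List (Int × List Int))) (degrees : List (Int × Int)) (max_degree i : Int) : List Int :=
  ((PySem.List.pyRange 0 i 1).map (pvG entities degrees max_degree)).flatten

theorem pvLvl_nonneg (maxd d : Int) : 0 ≤ pvLvl maxd d := by
  unfold pvLvl; split <;> omega

theorem pvHasKey_pvPop_ne (es : List (Int × List (Int × List Int))) (e x : Int) (h : x ≠ e) :
    pvHasKey (pvPop es e) x = pvHasKey es x := by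
  unfold pvHasKey pvPop
  rw [List.any_filter]
  refine PySem.List.any_congr_mem ?_
  intro p _
  by_cases hx : p.1 = x
  · simp [hx, h]
  · simp [hx]

theorem pvContains_ofList (R : List Int) (x : Int) :
    (PySem.Set.ofList R).contains x = decide (x ∈ R) := by
  by_cases h : x ∈ R
  · simp only [h, decide_true]
    exact (PySem.Set.contains_iff _ _).mpr ((PySem.Set.mem_ofList _ _).mpr h)
  · simp only [h, decide_false]
    rw [Bool.eq_false_iff]
    intro hc
    exact h ((PySem.Set.mem_ofList _ _).mp ((PySem.Set.contains_iff _ _).mp hc))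

theorem set_foldl_filter (c : Int → Bool) (ts : List Int) :
    ts.foldl (fun s t => if c t then PySem.Set.add s t else s) PySem.Set.empty
      = PySem.Set.ofList (ts.filter c) := by
  rw [PySem.Set.ofList_eq_foldl, List.foldl_filter]
  rfl

theorem pvPop_foldl_eq_filter (R : List Int) (es : List (Int × List (Int × List Int))) :
    R.foldl pvPop es = es.filter (fun p => !(decide (p.1 ∈ R))) := by
  induction R generalizing es with
  | nil => simp
  | cons e R ih =>
    rw [List.foldl_cons, ih]
    unfold pvPop
    rw [List.filter_filter]
    refine List.filter_congr ?_
    intro p _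
    by_cases h1 : p.1 = e <;> by_cases h2 : p.1 ∈ R <;> simp [h1, h2]

theorem pvHasKey_foldl_pvPop (R : List Int) (es : List (Int × List (Int × List Int))) (x : Int) :
    pvHasKey (R.foldl pvPop es) x = (pvHasKey es x && !(decide (x ∈ R))) := by
  rw [pvPop_foldl_eq_filter]
  unfold pvHasKey
  rw [List.any_filter]
  by_cases h : x ∈ R
  · simp only [h, decide_true, Bool.not_true, Bool.and_false]
    rw [List.any_eq_false]
    intro p _
    by_cases hpx : p.1 = x <;> simp [hpx, h]
  · simp only [h, decide_false, Bool.not_false, Bool.and_true]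
    refine PySem.List.any_congr_mem ?_
    intro p _
    by_cases hpx : p.1 = x <;> simp [hpx, h]

theorem mem_pvF_iff (entities : List (Int × List (Int × List Int))) (degrees : List (Int × Int)) (maxd : Int)
    (hnd : (degrees.map Prod.fst).Nodup) (p : Int × Int) (hp : p ∈ degrees) (i : Int) :
    p.1 ∈ pvF entities degrees maxd i ↔ (pvHasKey entities p.1 = true ∧ pvLvl maxd p.2 < i) := by
  unfold pvF pvG
  simp only [List.mem_flatten, List.mem_map]
  constructor
  · rintro ⟨l, ⟨j, hj, rfl⟩, hmem⟩
    rw [PySem.List.mem_pyRange_one] at hj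
    rcases List.mem_map.mp hmem with ⟨q, hq, hq1⟩
    rcases List.mem_filter.mp hq with ⟨hqdeg, hcond⟩
    have hqp : q = p := List.inj_on_of_nodup_map hnd hqdeg hp hq1
    subst hqp
    rw [Bool.and_eq_true, beq_iff_eq] at hcond
    exact ⟨hcond.1, by omega⟩
  · rintro ⟨hk, hlt⟩
    refine ⟨pvG entities degrees maxd (pvLvl maxd p.2), ⟨pvLvl maxd p.2, ?_, rfl⟩, ?_⟩
    · rw [PySem.List.mem_pyRange_one]
      exact ⟨pvLvl_nonneg _ _, hlt⟩
    · exact List.mem_map_of_mem (List.mem_filter.mpr ⟨hp, by simp [hk]⟩)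

theorem pvF_succ (entities : List (Int × List (Int × List Int))) (degrees : List (Int × Int)) (maxd i : Int) (hi : 0 ≤ i) :
    pvF entities degrees maxd (i + 1) = pvF entities degrees maxd i ++ pvG entities degrees maxd i := by
  unfold pvF
  rw [PySem.List.pyRange_one_succ_right hi, List.map_append, List.flatten_append]
  simp

theorem pvF_prefix (entities : List (Int × List (Int × List Int))) (degrees : List (Int × Int)) (maxd i m1 : Int)
    (h0 : 0 ≤ i) (him : i ≤ m1) :
    ∃ t, pvF entities degrees maxd m1 = pvF entities degrees maxd i ++ t := by
  refine ⟨((PySem.List.pyRange i m1 1).map (pvG entities degrees maxd)).flatten, ?_⟩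
  unfold pvF
  rw [PySem.List.pyRange_one_append 0 i m1 h0 him, List.map_append, List.flatten_append]

theorem pvAinner_eq (maxd rn i : Int) (ds : List (Int × Int)) (es : List (Int × List (Int × List Int))) (cnt : Int)
    (hnd : (ds.map Prod.fst).Nodup) :
    pvAinner maxd rn i ds es cnt =
      ((((ds.filter (fun p => pvHasKey es p.1 && (decide (maxd < p.2) || decide (p.2 ≤ i)))).map Prod.fst).take (rn - cnt).toNat).foldl pvPop es,
       cnt + ((((ds.filter (fun p => pvHasKey es p.1 && (decide (maxd < p.2) || decide (p.2 ≤ i)))).map Prod.fst).take (rn - cnt).toNat).length : Int)) := by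
  induction ds generalizing es cnt with
  | nil => simp [pvAinner]
  | cons hd tl ih =>
    obtain ⟨e, d⟩ := hd
    rw [List.map_cons, List.nodup_cons] at hnd
    by_cases hcap : rn ≤ cnt
    · have h0 : (rn - cnt).toNat = 0 := by omega
      simp [pvAinner, hcap, h0]
    · have hsucc : (rn - cnt).toNat = (rn - (cnt + 1)).toNat + 1 := by omega
      by_cases hk : pvHasKey es e
      · by_cases hcond : (decide (maxd < d) || decide (d ≤ i)) = true
        · have hstep : pvAinner maxd rn i ((e, d) :: tl) es cnt
              = pvAinner maxd rn i tl (pvPop es e) (cnt + 1) := by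
            by_cases h1 : maxd < d
            · simp [pvAinner, hcap, hk, h1]
            · have h2 : d ≤ i := by
                rw [Bool.or_eq_true, decide_eq_true_eq, decide_eq_true_eq] at hcond
                rcases hcond with h | h
                · exact absurd h h1
                · exact h
              simp [pvAinner, hcap, hk, h1, h2]
          have hfc : tl.filter (fun p => pvHasKey (pvPop es e) p.1 && (decide (maxd < p.2) || decide (p.2 ≤ i)))
              = tl.filter (fun p => pvHasKey es p.1 && (decide (maxd < p.2) || decide (p.2 ≤ i))) := by
            refine List.filter_congr ?_
            intro p hp
            exact pvHasKey_pvPop_ne es e p.1 (fun hpe => hnd.1 (List.mem_map.mpr ⟨p, hp, hpe⟩)) ▸ rfl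
          rw [hstep, ih (pvPop es e) (cnt + 1) hnd.2, hfc]
          have hfilter : ((e, d) :: tl).filter (fun p => pvHasKey es p.1 && (decide (maxd < p.2) || decide (p.2 ≤ i)))
              = (e, d) :: tl.filter (fun p => pvHasKey es p.1 && (decide (maxd < p.2) || decide (p.2 ≤ i))) := by
            simp [List.filter_cons, hk, hcond]
          rw [hfilter, List.map_cons, hsucc, List.take_succ_cons, List.foldl_cons]
          refine Prod.ext rfl ?_
          simp only [List.length_cons]
          push_cast
          omega
        · have h1 : ¬ (maxd < d) := by
            intro h; exact hcond (by simp [h])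
          have h2 : ¬ (d ≤ i) := by
            intro h; exact hcond (by simp [h])
          have hfilter : ((e, d) :: tl).filter (fun p => pvHasKey es p.1 && (decide (maxd < p.2) || decide (p.2 ≤ i)))
              = tl.filter (fun p => pvHasKey es p.1 && (decide (maxd < p.2) || decide (p.2 ≤ i))) := by
            simp [List.filter_cons, h1, h2]
          rw [show pvAinner maxd rn i ((e, d) :: tl) es cnt = pvAinner maxd rn i tl es cnt by
                simp [pvAinner, hcap, hk, h1, h2]]
          rw [ih es cnt hnd.2, hfilter]
      · have hkf : pvHasKey es e = false := Bool.eq_false_iff.mpr hk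
        have hfilter : ((e, d) :: tl).filter (fun p => pvHasKey es p.1 && (decide (maxd < p.2) || decide (p.2 ≤ i)))
            = tl.filter (fun p => pvHasKey es p.1 && (decide (maxd < p.2) || decide (p.2 ≤ i))) := by
          simp [List.filter_cons, hkf]
        rw [show pvAinner maxd rn i ((e, d) :: tl) es cnt = pvAinner maxd rn i tl es cnt by
              simp [pvAinner, hcap, hkf]]
        rw [ih es cnt hnd.2, hfilter]

theorem filter_cond_eq (entities : List (Int × List (Int × List Int))) (degrees : List (Int × Int)) (maxd : Int)
    (hnd : (degrees.map Prod.fst).Nodup) (i : Int) (hi : 0 ≤ i) :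
    degrees.filter (fun p => pvHasKey ((pvF entities degrees maxd i).foldl pvPop entities) p.1 && (decide (maxd < p.2) || decide (p.2 ≤ i)))
      = degrees.filter (fun p => pvHasKey entities p.1 && (pvLvl maxd p.2 == i)) := by
  refine List.filter_congr ?_
  intro p hp
  rw [pvHasKey_foldl_pvPop]
  by_cases hk : pvHasKey entities p.1
  · have hmem := mem_pvF_iff entities degrees maxd hnd p hp i
    by_cases hin : p.1 ∈ pvF entities degrees maxd i
    · have hlt : pvLvl maxd p.2 < i := (hmem.mp hin).2
      have hne : ¬ (pvLvl maxd p.2 = i) := by omega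
      simp [hk, hin, hne]
    · have hge : ¬ (pvLvl maxd p.2 < i) := fun hlt => hin (hmem.mpr ⟨hk, hlt⟩)
      simp only [hk, hin, decide_false, Bool.not_false, Bool.true_and, Bool.and_true]
      by_cases hc : maxd < p.2 ∨ p.2 ≤ 0
      · have hl0 : pvLvl maxd p.2 = 0 := by unfold pvLvl; rw [if_pos hc]
        have hi0 : i = 0 := by rw [hl0] at hge; omega
        rw [hl0, hi0]
        rcases hc with h | h
        · simp [h]
        · have hpi : p.2 ≤ (0 : Int) := by omega
          simp [hpi]
      · have hl : pvLvl maxd p.2 = p.2 := by unfold pvLvl; rw [if_neg hc]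
        have hA : ¬ (maxd < p.2) := fun h => hc (Or.inl h)
        rw [hl] at hge
        rw [hl]
        by_cases hle : p.2 ≤ i
        · have hpi : p.2 = i := by omega
          rw [hpi]
          simp
        · have h1 : decide (maxd < p.2) = false := by simp [hA]
          have h2 : decide (p.2 ≤ i) = false := by simp [hle]
          have h3 : (p.2 == i) = false := by simp; omega
          rw [h1, h2, h3]
          rfl
  · have hkf : pvHasKey entities p.1 = false := Bool.eq_false_iff.mpr hk
    simp [hkf]

theorem pvAouter_done (degrees : List (Int × Int)) (maxd rn stop i : Int) (es : List (Int × List (Int × List Int))) (cnt : Int)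
    (h : rn ≤ cnt) : pvAouter degrees maxd rn stop i es cnt = es := by
  rw [pvAouter]
  by_cases h1 : i < stop
  · rw [dif_pos h1, if_pos h]
  · rw [dif_neg h1]

theorem pvAouter_eq (entities : List (Int × List (Int × List Int))) (degrees : List (Int × Int)) (maxd rn m : Int)
    (hnd : (degrees.map Prod.fst).Nodup) (hm : 0 ≤ m) :
    ∀ (n : Nat) (i : Int), 0 ≤ i → i ≤ m + 1 → (m + 1 - i).toNat = n →
    pvAouter degrees maxd rn (m + 1) i
        (((pvF entities degrees maxd i).take rn.toNat).foldl pvPop entities)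
        (((pvF entities degrees maxd i).take rn.toNat).length : Int)
      = ((pvF entities degrees maxd (m + 1)).take rn.toNat).foldl pvPop entities := by
  intro n
  induction n with
  | zero =>
    intro i h0 hi hn
    have hieq : i = m + 1 := by omega
    subst hieq
    rw [pvAouter, dif_neg (by omega : ¬ (m + 1 < m + 1))]
  | succ n ih =>
    intro i h0 hi hn
    have him : i < m + 1 := by omega
    rw [pvAouter, dif_pos him]
    by_cases hcap : rn ≤ (((pvF entities degrees maxd i).take rn.toNat).length : Int)
    · rw [if_pos hcap]
      obtain ⟨t, ht⟩ := pvF_prefix entities degrees maxd i (m + 1) h0 (by omega)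
      have htk : (pvF entities degrees maxd (m + 1)).take rn.toNat = (pvF entities degrees maxd i).take rn.toNat := by
        rw [ht]
        by_cases hrn : 0 ≤ rn
        · have hlen : rn.toNat ≤ (pvF entities degrees maxd i).length := by
            rw [List.length_take] at hcap
            omega
          exact List.take_append_of_le_length hlen
        · have hz : rn.toNat = 0 := by omega
          simp [hz]
      rw [htk]
    · rw [if_neg hcap]
      have hlen : (pvF entities degrees maxd i).length ≤ rn.toNat := by
        rw [List.length_take] at hcap
        omega
      have hR : (pvF entities degrees maxd i).take rn.toNat = pvF entities degrees maxd i :=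
        List.take_of_length_le hlen
      rw [hR] at hcap ⊢
      rw [pvAinner_eq maxd rn i degrees _ _ hnd, filter_cond_eq entities degrees maxd hnd i h0]
      dsimp only
      rw [show ((degrees.filter (fun p => pvHasKey entities p.1 && (pvLvl maxd p.2 == i))).map Prod.fst)
            = pvG entities degrees maxd i from rfl]
      have hcnt : ((pvF entities degrees maxd i).length : Int) < rn := by omega
      have htoNat : (rn - ((pvF entities degrees maxd i).length : Int)).toNat = rn.toNat - (pvF entities degrees maxd i).length := by
        omega
      have htake : (pvF entities degrees maxd (i + 1)).take rn.toNat
          = pvF entities degrees maxd i ++ (pvG entities degrees maxd i).take (rn - ((pvF entities degrees maxd i).length : Int)).toNat := by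
        rw [pvF_succ entities degrees maxd i h0, List.take_append, List.take_of_length_le hlen, htoNat]
      have hfold : ((pvG entities degrees maxd i).take (rn - ((pvF entities degrees maxd i).length : Int)).toNat).foldl pvPop ((pvF entities degrees maxd i).foldl pvPop entities)
          = ((pvF entities degrees maxd (i + 1)).take rn.toNat).foldl pvPop entities := by
        rw [htake, List.foldl_append]
      have hlen2 : ((pvF entities degrees maxd i).length : Int) + (((pvG entities degrees maxd i).take (rn - ((pvF entities degrees maxd i).length : Int)).toNat).length : Int)
          = (((pvF entities degrees maxd (i + 1)).take rn.toNat).length : Int) := by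
        rw [htake, List.length_append]
        push_cast
        ring
      rw [hfold, hlen2]
      exact ih (i + 1) (by omega) (by omega) (by omega)

theorem removedA_eq (entities : List (Int × List (Int × List Int))) (degrees : List (Int × Int)) (maxd rn m : Int)
    (hnd : (degrees.map Prod.fst).Nodup) (hm : 0 ≤ m) :
    pvAouter degrees maxd rn (m + 1) 0 entities 0
      = ((pvF entities degrees maxd (m + 1)).take rn.toNat).foldl pvPop entities := by
  have h := pvAouter_eq entities degrees maxd rn m hnd hm (m + 1 - 0).toNat 0 (by omega) (by omega) rfl
  have h0 : pvF entities degrees maxd 0 = [] := by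
    unfold pvF
    rw [PySem.List.pyRange_one_eq_nil (le_refl 0)]
    rfl
  rw [h0] at h
  simpa using h

-- B's bucket-building step, named for the proofs
def pvBStep (entities : List (Int × List (Int × List Int))) (max_degree min_degree : Int) :
    PySem.Dict Int (List Int) → (Int × Int) → PySem.Dict Int (List Int) := fun b p =>
  if pvHasKey entities p.1 then
    if pvLvl max_degree p.2 ≤ min_degree then b.modify (pvLvl max_degree p.2) [] (· ++ [p.1]) else b
  else b

theorem pvBuckets_eq_foldl (entities : List (Int × List (Int × List Int))) (degrees : List (Int × Int)) (maxd m : Int) :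
    pvBuckets entities degrees maxd m = degrees.foldl (pvBStep entities maxd m) PySem.Dict.empty := rfl

theorem bucketsAux_getD (entities : List (Int × List (Int × List Int))) (maxd m k : Int) (hk : k ≤ m)
    (ds : List (Int × Int)) :
    ∀ b : PySem.Dict Int (List Int),
    (ds.foldl (pvBStep entities maxd m) b).getD k []
      = b.getD k [] ++ (ds.filter (fun p => pvHasKey entities p.1 && (pvLvl maxd p.2 == k))).map Prod.fst := by
  induction ds with
  | nil => simp
  | cons p tl ih =>
    intro b
    rw [List.foldl_cons, ih]
    show (pvBStep entities maxd m b p).getD k [] ++ _ = _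
    unfold pvBStep
    by_cases hkey : pvHasKey entities p.1
    · by_cases hlm : pvLvl maxd p.2 ≤ m
      · rw [if_pos hkey, if_pos hlm, PySem.Dict.getD_modify]
        by_cases hpk : k = pvLvl maxd p.2
        · rw [if_pos hpk]
          have hbeq : (pvLvl maxd p.2 == k) = true := by simp [hpk]
          simp [List.filter_cons, hkey, hbeq, hpk]
        · rw [if_neg hpk]
          have hbeq : (pvLvl maxd p.2 == k) = false := by simp; omega
          simp [List.filter_cons, hbeq]
      · rw [if_pos hkey, if_neg hlm]
        have hbeq : (pvLvl maxd p.2 == k) = false := by simp; omega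
        simp [List.filter_cons, hbeq]
    · have hkf : pvHasKey entities p.1 = false := Bool.eq_false_iff.mpr hkey
      rw [if_neg hkey]
      simp [List.filter_cons, hkf]

theorem bucketsAux_mem_keys (entities : List (Int × List (Int × List Int))) (maxd m k : Int)
    (ds : List (Int × Int)) :
    ∀ b : PySem.Dict Int (List Int),
    (k ∈ (ds.foldl (pvBStep entities maxd m) b).keys
      ↔ k ∈ b.keys ∨ ∃ p ∈ ds, pvHasKey entities p.1 = true ∧ pvLvl maxd p.2 = k ∧ pvLvl maxd p.2 ≤ m) := by
  induction ds with
  | nil => simp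
  | cons p tl ih =>
    intro b
    rw [List.foldl_cons, ih]
    show _ ∈ (pvBStep entities maxd m b p).keys ∨ _ ↔ _
    unfold pvBStep
    by_cases hkey : pvHasKey entities p.1
    · by_cases hlm : pvLvl maxd p.2 ≤ m
      · rw [if_pos hkey, if_pos hlm]
        have : k ∈ (b.modify (pvLvl maxd p.2) [] (· ++ [p.1])).keys ↔ k = pvLvl maxd p.2 ∨ k ∈ b.keys := by
          rw [show (b.modify (pvLvl maxd p.2) [] (· ++ [p.1])).keys
                = (b.insert (pvLvl maxd p.2) ((b.getD (pvLvl maxd p.2) []) ++ [p.1])).keys from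
              PySem.Dict.keys_modify b _ _ _]
          exact PySem.Dict.mem_keys_insert b _ _ _
        rw [this]
        constructor
        · rintro ((rfl | hb) | ⟨q, hq, hprops⟩)
          · exact Or.inr ⟨p, List.mem_cons_self, hkey, rfl, hlm⟩
          · exact Or.inl hb
          · exact Or.inr ⟨q, List.mem_cons_of_mem _ hq, hprops⟩
        · rintro (hb | ⟨q, hq, hq1, hq2, hq3⟩)
          · exact Or.inl (Or.inr hb)
          · rcases List.mem_cons.mp hq with rfl | hq
            · exact Or.inl (Or.inl hq2.symm)
            · exact Or.inr ⟨q, hq, hq1, hq2, hq3⟩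
      · rw [if_pos hkey, if_neg hlm]
        constructor
        · rintro (hb | ⟨q, hq, hprops⟩)
          · exact Or.inl hb
          · exact Or.inr ⟨q, List.mem_cons_of_mem _ hq, hprops⟩
        · rintro (hb | ⟨q, hq, hq1, hq2, hq3⟩)
          · exact Or.inl hb
          · rcases List.mem_cons.mp hq with rfl | hq
            · exact absurd (hq2 ▸ hq3) hlm
            · exact Or.inr ⟨q, hq, hq1, hq2, hq3⟩
    · rw [if_neg hkey]
      constructor
      · rintro (hb | ⟨q, hq, hprops⟩)
        · exact Or.inl hb
        · exact Or.inr ⟨q, List.mem_cons_of_mem _ hq, hprops⟩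
      · rintro (hb | ⟨q, hq, hq1, hq2, hq3⟩)
        · exact Or.inl hb
        · rcases List.mem_cons.mp hq with rfl | hq
          · exact absurd hq1 (Bool.eq_false_iff.mpr hkey ▸ by simp [Bool.eq_false_iff.mpr hkey])
          · exact Or.inr ⟨q, hq, hq1, hq2, hq3⟩

theorem bucketsAux_nodup_keys (entities : List (Int × List (Int × List Int))) (maxd m : Int)
    (ds : List (Int × Int)) :
    ∀ b : PySem.Dict Int (List Int), b.keys.Nodup → (ds.foldl (pvBStep entities maxd m) b).keys.Nodup := by
  induction ds with
  | nil => intro b hb; simpa using hb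
  | cons p tl ih =>
    intro b hb
    rw [List.foldl_cons]
    refine ih _ ?_
    show (pvBStep entities maxd m b p).keys.Nodup
    unfold pvBStep
    split_ifs with h1 h2
    · rw [PySem.Dict.keys_modify]
      exact PySem.Dict.nodup_keys_insert _ _ _ hb
    · exact hb
    · exact hb

theorem mem_keys_pvBuckets (entities : List (Int × List (Int × List Int))) (degrees : List (Int × Int)) (maxd m k : Int) :
    k ∈ (pvBuckets entities degrees maxd m).keys
      ↔ ∃ p ∈ degrees, pvHasKey entities p.1 = true ∧ pvLvl maxd p.2 = k ∧ pvLvl maxd p.2 ≤ m := by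
  rw [pvBuckets_eq_foldl, bucketsAux_mem_keys]
  simp [PySem.Dict.keys_empty]

theorem sorted_keys_eq (entities : List (Int × List (Int × List Int))) (degrees : List (Int × Int)) (maxd m : Int) :
    PySem.List.sorted (pvBuckets entities degrees maxd m).keys (fun x => x) false
      = (PySem.List.pyRange 0 (m + 1) 1).filter (fun k => decide (k ∈ (pvBuckets entities degrees maxd m).keys)) := by
  apply PySem.List.sorted_eq_of_perm_of_pairwise_lt
  · rw [List.perm_ext_iff_of_nodup
      ((PySem.List.nodup_pyRange_one 0 (m + 1)).filter _)
      (by rw [pvBuckets_eq_foldl]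
          exact bucketsAux_nodup_keys entities maxd m degrees PySem.Dict.empty (by simp [PySem.Dict.keys_empty]))]
    intro a
    rw [List.mem_filter]
    constructor
    · rintro ⟨_, ha⟩
      exact of_decide_eq_true ha
    · intro ha
      refine ⟨?_, decide_eq_true ha⟩
      rcases (mem_keys_pvBuckets entities degrees maxd m a).mp ha with ⟨p, _, _, hlv, hlm⟩
      rw [PySem.List.mem_pyRange_one]
      have := pvLvl_nonneg maxd p.2
      omega
  · exact (PySem.List.pairwise_lt_pyRange_one 0 (m + 1)).filter _

theorem flatMap_getD_eq (entities : List (Int × List (Int × List Int))) (degrees : List (Int × Int)) (maxd m : Int)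
    (L : List Int) (hL : ∀ k ∈ L, 0 ≤ k ∧ k ≤ m) :
    (L.filter (fun k => decide (k ∈ (pvBuckets entities degrees maxd m).keys))).flatMap
        (fun k => (pvBuckets entities degrees maxd m).getD k [])
      = L.flatMap (pvG entities degrees maxd) := by
  induction L with
  | nil => simp
  | cons k tl ih =>
    have hk := hL k (List.mem_cons_self)
    have htl : ∀ j ∈ tl, 0 ≤ j ∧ j ≤ m := fun j hj => hL j (List.mem_cons_of_mem _ hj)
    have hgetD : (pvBuckets entities degrees maxd m).getD k [] = pvG entities degrees maxd k := by
      rw [pvBuckets_eq_foldl, bucketsAux_getD entities maxd m k hk.2 degrees PySem.Dict.empty]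
      simp [pvG]
    rw [List.filter_cons]
    by_cases hmem : k ∈ (pvBuckets entities degrees maxd m).keys
    · simp only [hmem, decide_true, if_true, List.flatMap_cons]
      rw [hgetD, ih htl]
    · simp only [hmem, decide_false, Bool.false_eq_true, if_false, List.flatMap_cons]
      have hnil : pvG entities degrees maxd k = [] := by
        by_contra hne
        rcases List.exists_mem_of_ne_nil _ hne with ⟨x, hx⟩
        unfold pvG at hx
        rcases List.mem_map.mp hx with ⟨q, hq, _⟩
        rcases List.mem_filter.mp hq with ⟨hqdeg, hcond⟩
        rw [Bool.and_eq_true, beq_iff_eq] at hcond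
        obtain ⟨hkey, hlvk⟩ := hcond
        exact hmem ((mem_keys_pvBuckets entities degrees maxd m k).mpr
          ⟨q, hqdeg, hkey, hlvk, by omega⟩)
      rw [hnil, ih htl]
      simp

theorem removedB_eq (entities : List (Int × List (Int × List Int))) (degrees : List (Int × Int)) (maxd rn m : Int)
    (hnd : (degrees.map Prod.fst).Nodup) (hm : 0 ≤ m) (hrn : 0 < rn) :
    pvRemoved entities degrees m maxd rn = (pvF entities degrees maxd (m + 1)).take rn.toNat := by
  unfold pvRemoved
  rw [if_pos ⟨hm, hrn⟩]
  show PySem.List.slice _ none (some rn) = _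
  rw [PySem.List.slice_to _ (le_of_lt hrn)]
  rw [PySem.List.foldl_append_eq_flatMap, List.nil_append]
  rw [sorted_keys_eq]
  rw [flatMap_getD_eq entities degrees maxd m (PySem.List.pyRange 0 (m + 1) 1)
      (fun k hk => by rw [PySem.List.mem_pyRange_one] at hk; omega)]
  rw [List.flatMap_def]
  rfl

theorem prune_eq (entities : List (Int × List (Int × List Int))) (R : List Int) :
    ((R.foldl pvPop entities).foldl (fun (acc : List (Int × List (Int × List Int))) (hp : Int × List (Int × List Int)) =>
        let ptNew := hp.2.foldl (fun (pacc : List (Int × PySem.Set Int)) pt =>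
          let tailsNew : PySem.Set Int :=
            pt.2.foldl (fun s t => if pvHasKey (R.foldl pvPop entities) t then PySem.Set.add s t else s) PySem.Set.empty
          if tailsNew.length ≠ 0 then pvDictInsert pacc pt.1 tailsNew else pacc) ([] : List (Int × PySem.Set Int))
        if ptNew.length ≠ 0 then pvDictInsert acc hp.1 ptNew else acc) [])
    = (entities.foldl (fun (acc : List (Int × List (Int × List Int))) (hp : Int × List (Int × List Int)) =>
        if (PySem.Set.ofList R).contains hp.1 then acc
        else
          let ptNew := hp.2.foldl (fun (pacc : List (Int × PySem.Set Int)) pt =>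
            let ts : PySem.Set Int :=
              PySem.Set.ofList (pt.2.filter (fun t => pvHasKey entities t && !((PySem.Set.ofList R).contains t)))
            if ts.length ≠ 0 then pvDictInsert pacc pt.1 ts else pacc) ([] : List (Int × PySem.Set Int))
          if ptNew.length ≠ 0 then pvDictInsert acc hp.1 ptNew else acc) []) := by
  simp only [pvHasKey_foldl_pvPop, pvContains_ofList]
  rw [pvPop_foldl_eq_filter, List.foldl_filter]
  refine PySem.List.foldl_congr_mem _ _ _ _ ?_
  intro acc hp _
  by_cases hR : hp.1 ∈ R
  · simp [hR]
  · simp only [hR, decide_false, Bool.not_false, if_true, Bool.false_eq_true, if_false]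
    rw [show (fun (pacc : List (Int × PySem.Set Int)) (pt : Int × List Int) =>
          if (pt.2.foldl (fun s t => if pvHasKey entities t && !(decide (t ∈ R)) then PySem.Set.add s t else s) PySem.Set.empty).length ≠ 0
          then pvDictInsert pacc pt.1 (pt.2.foldl (fun s t => if pvHasKey entities t && !(decide (t ∈ R)) then PySem.Set.add s t else s) PySem.Set.empty)
          else pacc)
        = (fun (pacc : List (Int × PySem.Set Int)) (pt : Int × List Int) =>
          if (PySem.Set.ofList (pt.2.filter (fun t => pvHasKey entities t && !(decide (t ∈ R))))).length ≠ 0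
          then pvDictInsert pacc pt.1 (PySem.Set.ofList (pt.2.filter (fun t => pvHasKey entities t && !(decide (t ∈ R)))))
          else pacc) from by
      funext pacc pt
      rw [set_foldl_filter]]

-- ===== VERDICT (by name: the statement is the Claim_ definition above) =====
theorem remove_by_min_degree_sorted_spec : Claim_equal_remove_by_min_degree_sorted := by
  intro entities degrees min_degree max_degree remove_num _ hPre
  unfold Spec_remove_by_min_degree_sorted
  unfold remove_by_min_degree_sorted remove_by_min_degree_sorted_alt
  by_cases hc : 0 ≤ min_degree ∧ 0 < remove_num
  · rw [removedA_eq entities degrees max_degree remove_num min_degree hPre hc.1]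
    rw [show pvRemoved entities degrees min_degree max_degree remove_num
          = (pvF entities degrees max_degree (min_degree + 1)).take remove_num.toNat from
        removedB_eq entities degrees max_degree remove_num min_degree hPre hc.1 hc.2]
    exact prune_eq entities _
  · -- no pass runs (min_degree < 0) or the budget is ≤ 0: nothing is removed on either side
    have hA : pvAouter degrees max_degree remove_num (min_degree + 1) 0 entities 0 = entities := by
      rcases not_and_or.mp hc with h | h
      · rw [pvAouter, dif_neg (by omega : ¬ ((0 : Int) < min_degree + 1))]
      · exact pvAouter_done _ _ _ _ _ _ _ (by omega)
    have hB : pvRemoved entities degrees min_degree max_degree remove_num = [] := by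
      unfold pvRemoved; rw [if_neg hc]
    rw [hA, hB]
    have h0 := prune_eq entities []
    simpa using h0
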